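-- pv_equiv track=rewrite | github.com/HanlonHuddle/SSW810Final_repo | HanrunLiHW07.py | book_index
-- ===== SOURCE A (Python) =====
-- def book_index(inputs):
--     """ book_index """
--     result = {}
--     tre = []
--     for tup in sorted(inputs):
--         if tup[0] in result:
--             result[tup[0]].add(tup[1])
--         else:
--             result[tup[0]] = {tup[1]}
--     for key in sorted(result):
--         tre.append([key, sorted(list(result[key]))])
--     return tre
-- ===== SOURCE B (Python) =====
-- def book_index(inputs):
--     """ book_index: one adjacency-grouping sweep over the sorted tuples,
--     no dict/set and no second key-sorting pass """
--     result = []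
--     for w, p in sorted(inputs):
--         if result and result[-1][0] == w:
--             pages = result[-1][1]
--             if pages[-1] != p:
--                 pages.append(p)
--         else:
--             result.append([w, [p]])
--     return result
-- ===== Notes on version B (the rewrite author's own statement) =====
-- stated objective: idiomatic
-- what changed: Replaces the dict-of-sets plus a separate key-sorting pass and per-key value sorts by a single adjacency-grouping sweep over sorted(inputs): because the tuples are sorted, equal keys are adjacent and each group's pages arrive in order, so appending a page only when it differs from the last one yields the deduplicated sorted page list directly.
import Mathlib
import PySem

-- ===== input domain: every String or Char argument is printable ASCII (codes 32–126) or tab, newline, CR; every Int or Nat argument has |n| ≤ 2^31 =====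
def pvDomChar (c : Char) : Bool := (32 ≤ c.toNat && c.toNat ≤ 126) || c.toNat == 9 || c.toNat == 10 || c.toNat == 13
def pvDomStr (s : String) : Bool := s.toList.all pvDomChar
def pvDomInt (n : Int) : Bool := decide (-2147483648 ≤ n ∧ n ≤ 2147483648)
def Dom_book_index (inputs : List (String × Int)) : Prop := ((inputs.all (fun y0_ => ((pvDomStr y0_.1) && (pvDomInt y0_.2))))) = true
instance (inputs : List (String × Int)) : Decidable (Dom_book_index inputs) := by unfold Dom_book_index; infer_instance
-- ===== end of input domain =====

-- B replaces A's dict-of-sets plus a separate key-sorting pass and per-key value sorts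
-- by one adjacency-grouping sweep over sorted(inputs); same return value, proved below.

-- ===== PORT A =====
-- loop body of A's first loop: 'if tup[0] in result: result[tup[0]].add(tup[1]) else: result[tup[0]] = {tup[1]}'
-- (result[tup[0]] in the then-branch is the getD: the key is present because 'contains' just held, so the default is never used)
def pvStep (d : PySem.Dict String (PySem.Set Int)) (tup : String × Int) : PySem.Dict String (PySem.Set Int) :=
  if d.contains tup.1 then
    d.insert tup.1 (PySem.Set.add (d.getD tup.1 PySem.Set.empty) tup.2)
  else
    d.insert tup.1 (PySem.Set.ofList [tup.2])

-- A's first loop, over sorted(inputs)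
def pvBuild (s : List (String × Int)) : PySem.Dict String (PySem.Set Int) :=
  s.foldl pvStep PySem.Dict.empty

-- A's second loop: 'for key in sorted(result): tre.append([key, sorted(list(result[key]))])'
def pvExtract (result : PySem.Dict String (PySem.Set Int)) : List (String × List Int) :=
  (PySem.List.sorted result.keys (fun k => k) false).foldl
    (fun tre key => tre ++ [(key, PySem.List.sorted (result.getD key PySem.Set.empty) (fun v => v) false)]) []

def book_index (inputs : List (String × Int)) : List (String × List Int) :=
  pvExtract (pvBuild (PySem.List.sorted inputs (fun t => (toLex t : Lex (String × Int))) false))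

-- ===== PORT B =====
-- Source B's loop: the running last group (w, ps) mirrors result[-1]; it is emitted when the key changes
def pvGrp (w : String) (ps : List Int) : List (String × Int) → List (String × List Int)
  | [] => [(w, ps)]
  | (w', p) :: rest =>
      if w' == w then
        pvGrp w (if ps.getLast? == some p then ps else ps ++ [p]) rest
      else
        (w, ps) :: pvGrp w' [p] rest

def pvBout (s : List (String × Int)) : List (String × List Int) :=
  match s with
  | [] => []
  | (w, p) :: rest => pvGrp w [p] rest

def book_index_alt (inputs : List (String × Int)) : List (String × List Int) :=
  pvBout (PySem.List.sorted inputs (fun t => (toLex t : Lex (String × Int))) false)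

-- ===== PRECONDITION & SPEC =====
def Spec_book_index (inputs : List (String × Int)) (out : List (String × List Int)) : Prop := out = book_index_alt inputs
instance (inputs : List (String × Int)) (out : List (String × List Int)) : Decidable (Spec_book_index inputs out) := by unfold Spec_book_index; infer_instance

-- ===== CLAIM (what is proved, stated in full; the proofs are below) =====
def Claim_equal_book_index : Prop := ∀ (inputs : List (String × Int)), Dom_book_index inputs → Spec_book_index inputs (book_index inputs)

-- ===== LEMMAS AND PROOFS =====

-- the per-group page accumulator performed by Source B's inner branch
def pvAcc (ps : List Int) (qs : List Int) : List Int :=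
  qs.foldl (fun ps p => if ps.getLast? == some p then ps else ps ++ [p]) ps

-- ---- B-side decomposition ----

theorem pvGrp_group (g : List (String × Int)) (w : String) (r : List (String × Int))
    (hg : ∀ x ∈ g, x.1 = w) :
    ∀ ps, pvGrp w ps (g ++ r) = pvGrp w (pvAcc ps (g.map (·.2))) r := by
  induction g with
  | nil => intro ps; rfl
  | cons a g ih =>
      intro ps
      obtain ⟨w', q⟩ := a
      have hw : w' = w := hg (w', q) (by simp)
      subst hw
      simp only [List.cons_append, pvGrp, beq_self_eq_true, if_true]
      rw [ih (fun x hx => hg x (by simp [hx]))]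
      rfl

theorem pvGrp_emit (w : String) (ps : List Int) (r : List (String × Int))
    (hr : ∀ x ∈ r, x.1 ≠ w) :
    pvGrp w ps r = (w, ps) :: pvBout r := by
  cases r with
  | nil => rfl
  | cons a r' =>
      obtain ⟨w', p'⟩ := a
      have : w' ≠ w := hr (w', p') (by simp)
      simp [pvGrp, pvBout, this]

-- ---- pvAcc: strictly increasing, and collects exactly the members ----

theorem pvLast_max (l : List Int) (b : Int) (hp : l.Pairwise (· < ·))
    (hl : l.getLast? = some b) : ∀ a ∈ l, a ≤ b := by
  induction l with
  | nil => simp at hl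
  | cons x t ih =>
      intro a ha
      cases t with
      | nil =>
          simp at hl ha
          omega
      | cons y t' =>
          rw [List.getLast?_cons_cons] at hl
          rcases List.mem_cons.1 ha with h | h
          · subst h
            have hb : b ∈ y :: t' := List.mem_of_getLast? hl
            have := (List.pairwise_cons.1 hp).1 b hb
            omega
          · exact ih (List.pairwise_cons.1 hp).2 hl a h

theorem pvAcc_inv (qs : List Int) : ∀ (init : List Int) (lastv : Int),
    init.Pairwise (· < ·) → init.getLast? = some lastv →
    qs.Pairwise (· ≤ ·) → (∀ b ∈ qs, lastv ≤ b) →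
    (pvAcc init qs).Pairwise (· < ·) ∧ ∀ x, x ∈ pvAcc init qs ↔ x ∈ init ∨ x ∈ qs := by
  induction qs with
  | nil =>
      intro init lastv h1 _ _ _
      exact ⟨h1, by simp [pvAcc]⟩
  | cons q qs' ih =>
      intro init lastv h1 h2 h3 h4
      have hstep : pvAcc init (q :: qs') =
          pvAcc (if init.getLast? == some q then init else init ++ [q]) qs' := rfl
      by_cases hq : init.getLast? = some q
      · have hql : lastv = q := by rw [hq] at h2; exact (Option.some.inj h2).symm
        have heq : (init.getLast? == some q) = true := by simp [hq]
        rw [hstep, heq, if_pos rfl]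
        have := ih init lastv h1 h2 (List.pairwise_cons.1 h3).2
          (fun b hb => h4 b (List.mem_cons_of_mem _ hb))
        refine ⟨this.1, fun x => ?_⟩
        rw [this.2 x]
        have hqmem : q ∈ init := List.mem_of_getLast? hq
        constructor
        · rintro (h | h)
          · exact Or.inl h
          · exact Or.inr (List.mem_cons_of_mem _ h)
        · rintro (h | h)
          · exact Or.inl h
          · rcases List.mem_cons.1 h with h | h
            · subst h; exact Or.inl hqmem
            · exact Or.inr h
      · have heq : (init.getLast? == some q) = false := by simp [hq]
        rw [hstep, heq, if_neg (by simp)]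
        have hlt : lastv < q := by
          have hle := h4 q (by simp)
          have : lastv ≠ q := by
            intro h; exact hq (by rw [← h]; exact h2)
          omega
        have h1' : (init ++ [q]).Pairwise (· < ·) := by
          rw [List.pairwise_append]
          refine ⟨h1, by simp, fun a ha b hb => ?_⟩
          have := pvLast_max init lastv h1 h2 a ha
          simp at hb
          omega
        have h2' : (init ++ [q]).getLast? = some q := by
          simp
        have := ih (init ++ [q]) q h1' h2' (List.pairwise_cons.1 h3).2
          (fun b hb => (List.pairwise_cons.1 h3).1 b hb)
        refine ⟨this.1, fun x => ?_⟩
        rw [this.2 x]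
        simp only [List.mem_append, List.mem_cons]
        tauto

-- fold of Set.add from ofList [p] IS ofList (p :: qs)
theorem pvS_eq (p : Int) (qs : List Int) :
    qs.foldl PySem.Set.add (PySem.Set.ofList [p]) = PySem.Set.ofList (p :: qs) := rfl

-- the sorted set of a nondecreasing group is exactly Source B's adjacency-deduped page list
theorem pvValues_eq (p : Int) (qs : List Int) (h : (p :: qs).Pairwise (· ≤ ·)) :
    PySem.List.sorted (PySem.Set.ofList (p :: qs)) (fun v => v) false = pvAcc [p] qs := by
  have hinv := pvAcc_inv qs [p] p (by simp) (by simp)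
    (List.pairwise_cons.1 h).2 (fun b hb => (List.pairwise_cons.1 h).1 b hb)
  apply PySem.List.sorted_eq_of_perm_of_pairwise_lt
  · rw [List.perm_ext_iff_of_nodup (List.Pairwise.imp (fun h => ne_of_lt h) hinv.1)
      (PySem.Set.nodup_ofList _)]
    intro a
    rw [hinv.2 a, PySem.Set.mem_ofList]
    simp
  · exact hinv.1

-- ---- A-side: the dict built from a group-decomposed sorted list ----

theorem pvStep_head_same (w : String) (T : PySem.Set Int) (q : Int) :
    pvStep (PySem.Dict.mk [(w, T)]) (w, q) = PySem.Dict.mk [(w, T.add q)] := by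
  simp [pvStep, PySem.Dict.contains, PySem.Dict.insert, PySem.Dict.getD, PySem.Dict.get?]

theorem pvStep_head_ne (w k : String) (T : PySem.Set Int) (ds : List (String × PySem.Set Int))
    (q : Int) (hk : k ≠ w) :
    pvStep (PySem.Dict.mk ((w, T) :: ds)) (k, q) =
      PySem.Dict.mk ((w, T) :: (pvStep (PySem.Dict.mk ds) (k, q)).items) := by
  have hwk : (w == k) = false := by simp [Ne.symm hk]
  have hnwk : ¬ w = k := fun h => hk h.symm
  unfold pvStep
  by_cases hc : (ds.any fun p => p.1 == k) = true
  · have h1 : (PySem.Dict.mk ((w, T) :: ds)).contains k = true := by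
      simp [PySem.Dict.contains, hwk, hc]
    have h2 : (PySem.Dict.mk ds).contains k = true := by
      simp [PySem.Dict.contains, hc]
    rw [if_pos h1, if_pos h2]
    simp [PySem.Dict.insert, h1, h2, PySem.Dict.getD, PySem.Dict.get?, hwk, hnwk]
  · have h2 : (ds.any fun p => p.1 == k) = false := eq_false_of_ne_true hc
    have h1 : (((w, T) :: ds).any fun p => p.1 == k) = false := by
      rw [List.any_cons]; simp [hwk, h2]
    have h1' : (PySem.Dict.mk ((w, T) :: ds)).contains k = false := h1
    have h2' : (PySem.Dict.mk ds).contains k = false := h2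
    rw [if_neg (by simp [h1']), if_neg (by simp [h2'])]
    simp [PySem.Dict.insert, h1', h2']

theorem pvBuild_group (g : List (String × Int)) (w : String) (hg : ∀ x ∈ g, x.1 = w) :
    ∀ T, g.foldl pvStep (PySem.Dict.mk [(w, T)]) =
      PySem.Dict.mk [(w, (g.map (·.2)).foldl PySem.Set.add T)] := by
  induction g with
  | nil => intro T; rfl
  | cons a g ih =>
      intro T
      obtain ⟨w', q⟩ := a
      have hw : w' = w := hg (w', q) (by simp)
      subst hw
      rw [List.foldl_cons, pvStep_head_same]
      rw [ih (fun x hx => hg x (by simp [hx]))]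
      rfl

theorem pvBuild_rest (r : List (String × Int)) (w : String) (hr : ∀ x ∈ r, x.1 ≠ w) :
    ∀ (T : PySem.Set Int) (ds : List (String × PySem.Set Int)),
      r.foldl pvStep (PySem.Dict.mk ((w, T) :: ds)) =
        PySem.Dict.mk ((w, T) :: (r.foldl pvStep (PySem.Dict.mk ds)).items) := by
  induction r with
  | nil => intro T ds; rfl
  | cons a r' ih =>
      intro T ds
      obtain ⟨k, q⟩ := a
      have hk : k ≠ w := hr (k, q) (by simp)
      rw [List.foldl_cons, pvStep_head_ne w k T ds q hk]
      exact ih (fun x hx => hr x (by simp [hx])) T _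

-- keys of the built dict come from the first components
theorem pvKeys_build (s : List (String × Int)) :
    ∀ d : PySem.Dict String (PySem.Set Int),
      (∀ k, k ∈ (s.foldl pvStep d).keys → k ∈ d.keys ∨ ∃ x ∈ s, k = x.1) := by
  induction s with
  | nil => intro d k h; exact Or.inl h
  | cons a s' ih =>
      intro d k h
      rcases ih (pvStep d a) k h with h' | h'
      · unfold pvStep at h'
        split at h' <;> rcases (PySem.Dict.mem_keys_insert _ _ _ _).1 h' with h'' | h''
        · exact Or.inr ⟨a, by simp, h''⟩
        · exact Or.inl h''
        · exact Or.inr ⟨a, by simp, h''⟩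
        · exact Or.inl h''
      · obtain ⟨x, hx, hk⟩ := h'
        exact Or.inr ⟨x, by simp [hx], hk⟩

theorem pvStep_as_insert :
    pvStep = fun (d : PySem.Dict String (PySem.Set Int)) (x : String × Int) =>
      d.insert x.1 (if d.contains x.1 then PySem.Set.add (d.getD x.1 PySem.Set.empty) x.2
                    else PySem.Set.ofList [x.2]) := by
  funext d x
  unfold pvStep
  split <;> simp

theorem pvNodup_keys_build (s : List (String × Int)) : (pvBuild s).keys.Nodup := by
  unfold pvBuild
  rw [pvStep_as_insert]
  exact PySem.Dict.nodup_keys_foldl_insert_key s (fun x => x.1)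
    (fun d x => if d.contains x.1 then PySem.Set.add (d.getD x.1 PySem.Set.empty) x.2
                else PySem.Set.ofList [x.2]) PySem.Dict.empty PySem.Dict.nodup_keys_empty

-- sorted of the extract loop is a map
theorem pvExtract_eq_map (D : PySem.Dict String (PySem.Set Int)) :
    pvExtract D = (PySem.List.sorted D.keys (fun k => k) false).map
      (fun k => (k, PySem.List.sorted (D.getD k PySem.Set.empty) (fun v => v) false)) := by
  unfold pvExtract
  rw [PySem.List.foldl_append_singleton_eq_map]
  simp

-- keys strictly above w stay behind w after sorting
theorem pvSortedKeys_cons (w : String) (kr : List String) (hnd : kr.Nodup)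
    (hgt : ∀ k ∈ kr, w < k) :
    PySem.List.sorted (w :: kr) (fun k => k) false =
      w :: PySem.List.sorted kr (fun k => k) false := by
  apply PySem.List.sorted_eq_of_perm_of_pairwise_lt
  · exact List.Perm.cons w (PySem.List.sorted_perm kr (fun k => k) false)
  · rw [List.pairwise_cons]
    constructor
    · intro k hk
      exact hgt k ((PySem.List.mem_sorted kr _ false k).1 hk)
    · have hle := PySem.List.sorted_pairwise kr (fun k => k)
      have hnd' : (PySem.List.sorted kr (fun k => k) false).Nodup :=
        ((PySem.List.sorted_perm kr (fun k => k) false).nodup_iff).2 hnd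
      exact (hle.and hnd').imp (fun h => lt_of_le_of_ne h.1 h.2)

-- every key of the suffix-dict is strictly above w
theorem pvDropWhile_gt (w : String) (rest : List (String × Int))
    (hp : rest.Pairwise (fun a b => (toLex a : Lex (String × Int)) ≤ toLex b))
    (hw : ∀ y ∈ rest, w ≤ y.1) :
    ∀ x ∈ rest.dropWhile (fun x => x.1 == w), w < x.1 := by
  induction rest with
  | nil => simp
  | cons a t ih =>
      by_cases ha : a.1 = w
      · rw [List.dropWhile_cons_of_pos (by simp [ha])]
        exact ih (List.pairwise_cons.1 hp).2 (fun y hy => hw y (by simp [hy]))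
      · rw [List.dropWhile_cons_of_neg (by simp [ha])]
        intro x hx
        have haw : w < a.1 := lt_of_le_of_ne (hw a (by simp)) (Ne.symm ha)
        rcases List.mem_cons.1 hx with h | h
        · subst h; exact haw
        · have := (List.pairwise_cons.1 hp).1 x h
          rcases Prod.Lex.toLex_le_toLex.1 this with h' | h'
          · exact lt_trans haw h'
          · rw [← h'.1]; exact haw

-- ---- main equivalence on any le-sorted list ----

theorem pvMain : ∀ (n : Nat) (s : List (String × Int)), s.length ≤ n →
    s.Pairwise (fun a b => (toLex a : Lex (String × Int)) ≤ toLex b) →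
    pvExtract (pvBuild s) = pvBout s := by
  intro n
  induction n with
  | zero =>
      intro s hs _
      have : s = [] := List.eq_nil_of_length_eq_zero (Nat.le_zero.1 hs)
      subst this; rfl
  | succ n ih =>
      intro s hs hp
      cases s with
      | nil => rfl
      | cons a rest =>
          obtain ⟨w, p⟩ := a
          set g := rest.takeWhile (fun x => x.1 == w) with hgdef
          set r := rest.dropWhile (fun x => x.1 == w) with hrdef
          have hgr : g ++ r = rest := List.takeWhile_append_dropWhile
          have hcons := List.pairwise_cons.1 hp
          have hgkey : ∀ x ∈ g, x.1 = w := by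
            intro x hx
            have := List.mem_takeWhile_imp hx
            simpa using this
          have hrgt : ∀ x ∈ r, w < x.1 :=
            pvDropWhile_gt w rest hcons.2 (fun y hy => by
              rcases Prod.Lex.toLex_le_toLex.1 (hcons.1 y hy) with h | h
              · exact le_of_lt h
              · exact le_of_eq h.1)
          have hrne : ∀ x ∈ r, x.1 ≠ w := fun x hx => ne_of_gt (hrgt x hx)
          have hrpair : r.Pairwise (fun a b => (toLex a : Lex (String × Int)) ≤ toLex b) :=
            hcons.2.sublist (List.dropWhile_sublist _)
          have hrlen : r.length ≤ n := by
            have h1 : r.length ≤ rest.length := (List.dropWhile_sublist _).length_le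
            have h2 : rest.length + 1 ≤ n + 1 := by simpa using hs
            omega
          -- snd components of the group are nondecreasing
          have hgrp_pair : ((w, p) :: g).Pairwise
              (fun a b => (toLex a : Lex (String × Int)) ≤ toLex b) := by
            refine hp.sublist ?_
            rw [← hgr]
            exact List.Sublist.cons₂ _ (List.sublist_append_left g r)
          have hsnd : (p :: g.map (·.2)).Pairwise (· ≤ ·) := by
            have : (((w, p) :: g).map (·.2)).Pairwise (· ≤ ·) := by
              rw [List.pairwise_map]
              refine hgrp_pair.imp_of_mem ?_
              intro a b ha hb hab
              have ha1 : a.1 = w := by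
                rcases List.mem_cons.1 ha with h | h
                · rw [h]
                · exact hgkey a h
              have hb1 : b.1 = w := by
                rcases List.mem_cons.1 hb with h | h
                · rw [h]
                · exact hgkey b h
              rcases Prod.Lex.toLex_le_toLex.1 hab with h | h
              · rw [ha1, hb1] at h; exact absurd h (lt_irrefl w)
              · exact h.2
            simpa using this
          -- the built dict decomposes
          have hD : pvBuild ((w, p) :: rest) =
              PySem.Dict.mk ((w, PySem.Set.ofList (p :: g.map (·.2))) :: (pvBuild r).items) := by
            unfold pvBuild
            rw [← hgr, List.foldl_cons]
            have h0 : pvStep PySem.Dict.empty (w, p) =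
                PySem.Dict.mk [(w, PySem.Set.ofList [p])] := rfl
            rw [h0, List.foldl_append,
              pvBuild_group g w hgkey (PySem.Set.ofList [p]),
              pvS_eq p (g.map (·.2)),
              pvBuild_rest r w hrne (PySem.Set.ofList (p :: g.map (·.2))) []]
            rfl
          -- keys of the suffix dict
          have hkr_gt : ∀ k ∈ (pvBuild r).keys, w < k := by
            intro k hk
            rcases pvKeys_build r PySem.Dict.empty k hk with h | ⟨x, hx, hkx⟩
            · simp [PySem.Dict.empty, PySem.Dict.keys] at h
            · rw [hkx]; exact hrgt x hx
          have hkr_ne : ∀ k ∈ (pvBuild r).keys, k ≠ w :=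
            fun k hk => ne_of_gt (hkr_gt k hk)
          -- assemble the A side
          rw [hD, pvExtract_eq_map]
          have hkeys : (PySem.Dict.mk ((w, PySem.Set.ofList (p :: g.map (·.2))) ::
              (pvBuild r).items)).keys = w :: (pvBuild r).keys := by
            simp [PySem.Dict.keys]
          rw [hkeys, pvSortedKeys_cons w (pvBuild r).keys (pvNodup_keys_build r) hkr_gt]
          rw [List.map_cons]
          -- head entry
          have hheadD : (PySem.Dict.mk ((w, PySem.Set.ofList (p :: g.map (·.2))) ::
              (pvBuild r).items)).getD w PySem.Set.empty = PySem.Set.ofList (p :: g.map (·.2)) := by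
            simp [PySem.Dict.getD, PySem.Dict.get?]
          rw [hheadD, pvValues_eq p (g.map (·.2)) hsnd]
          -- tail entries agree with the suffix dict
          have htail : (PySem.List.sorted (pvBuild r).keys (fun k => k) false).map
              (fun k => (k, PySem.List.sorted ((PySem.Dict.mk
                ((w, PySem.Set.ofList (p :: g.map (·.2))) :: (pvBuild r).items)).getD k
                PySem.Set.empty) (fun v => v) false)) =
              (PySem.List.sorted (pvBuild r).keys (fun k => k) false).map
              (fun k => (k, PySem.List.sorted ((pvBuild r).getD k PySem.Set.empty)
                (fun v => v) false)) := by
            apply List.map_congr_left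
            intro k hk
            have hkne : k ≠ w := hkr_ne k ((PySem.List.mem_sorted _ _ false k).1 hk)
            have : (w == k) = false := by simp [Ne.symm hkne]
            simp [PySem.Dict.getD, PySem.Dict.get?, this]
          rw [htail, ← pvExtract_eq_map, ih r hrlen hrpair]
          -- assemble the B side
          show _ = pvGrp w [p] rest
          rw [← hgr, pvGrp_group g w r hgkey [p], pvGrp_emit w _ r hrne]

-- ===== VERDICT (by name: the statement is the Claim_ definition above) =====
theorem book_index_spec : Claim_equal_book_index := by
  intro inputs _
  unfold Spec_book_index book_index book_index_alt
  exact pvMain (PySem.List.sorted inputs (fun t => (toLex t : Lex (String × Int))) false).length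
    _ le_rfl (PySem.List.sorted_pairwise inputs _)
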